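-- pv_equiv track=rewrite | github.com/prefersdosequis/morning-and-evening | fetch_devotions.py | get_month_name
-- ===== SOURCE A (Python) =====
-- def get_month_name(day_number):
--     """Get month name from day number (1-365)."""
--     months = ['January', 'February', 'March', 'April', 'May', 'June',
--               'July', 'August', 'September', 'October', 'November', 'December']
--     days_per_month = [31, 28, 31, 30, 31, 30, 31, 31, 30, 31, 30, 31]
--
--     day = day_number
--     for i, days in enumerate(days_per_month):
--         if day <= days:
--             return months[i]
--         day -= days
--     return 'December'
-- ===== SOURCE B (Python) =====
-- def get_month_name(day_number):
--     """Get month name from day number (1-365)."""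
--     months = ['January', 'February', 'March', 'April', 'May', 'June',
--               'July', 'August', 'September', 'October', 'November', 'December']
--     cumulative = [31, 59, 90, 120, 151, 181, 212, 243, 273, 304, 334, 365]
--     # binary search for the first threshold >= day_number (bisect_left)
--     lo, hi = 0, 12
--     while lo < hi:
--         mid = (lo + hi) // 2
--         if cumulative[mid] < day_number:
--             lo = mid + 1
--         else:
--             hi = mid
--     return months[min(lo, 11)]
-- ===== Notes on version B (the rewrite author's own statement) =====
-- stated objective: alternative
-- what changed: Replaced the subtract-as-you-go accumulator loop over days-per-month with a precomputed cumulative end-of-month threshold table searched by a hand-written bisect_left binary search, index clamped with min(lo, 11).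
import Mathlib
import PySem

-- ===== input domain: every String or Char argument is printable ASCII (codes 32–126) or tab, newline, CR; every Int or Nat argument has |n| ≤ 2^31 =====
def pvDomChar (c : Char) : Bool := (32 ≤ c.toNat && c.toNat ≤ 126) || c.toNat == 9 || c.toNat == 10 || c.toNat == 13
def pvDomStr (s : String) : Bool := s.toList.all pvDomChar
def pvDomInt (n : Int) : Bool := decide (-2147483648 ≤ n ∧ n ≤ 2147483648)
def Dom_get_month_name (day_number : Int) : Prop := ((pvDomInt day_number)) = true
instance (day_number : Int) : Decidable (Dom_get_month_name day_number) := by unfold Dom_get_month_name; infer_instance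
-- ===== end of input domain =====

-- B replaces A's subtract-as-you-go accumulator loop by a precomputed cumulative-threshold
-- table searched with a hand-written bisect_left binary search, index clamped by min(lo, 11).

-- ===== PORT A =====
def pvMonths : List String :=
  ["January", "February", "March", "April", "May", "June",
   "July", "August", "September", "October", "November", "December"]

-- A's loop: "for i, days in enumerate(days_per_month): if day <= days: return months[i]; day -= days"
def pvLoopA (day : Int) (i : Nat) : List Int → String
  | [] => "December"
  | days :: rest =>
    if day ≤ days then pvMonths.getD i ""   -- months[i]; i stays < 12, always in range
    else pvLoopA (day - days) (i + 1) rest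

def get_month_name (day_number : Int) : String :=
  pvLoopA day_number 0 [31, 28, 31, 30, 31, 30, 31, 31, 30, 31, 30, 31]

-- ===== PORT B =====
def pvCumulative : List Int := [31, 59, 90, 120, 151, 181, 212, 243, 273, 304, 334, 365]

-- B's "while lo < hi" bisect_left loop, ported with the standard fuel pattern
-- (fuel 12 ≥ hi - lo, and hi - lo shrinks each iteration, so the fuel never runs out)
def pvBisect (day : Int) : Nat → Nat → Nat → Nat
  | 0, lo, _ => lo
  | fuel + 1, lo, hi =>
    if lo < hi then
      let mid := (lo + hi) / 2
      if pvCumulative.getD mid 0 < day then pvBisect day fuel (mid + 1) hi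
      else pvBisect day fuel lo mid
    else lo

def get_month_name_alt (day_number : Int) : String :=
  pvMonths.getD (min (pvBisect day_number 12 0 12) 11) ""

-- ===== PRECONDITION & SPEC =====
def Spec_get_month_name (day_number : Int) (out : String) : Prop := out = get_month_name_alt day_number
instance (day_number : Int) (out : String) : Decidable (Spec_get_month_name day_number out) := by unfold Spec_get_month_name; infer_instance

-- ===== CLAIM (what is proved, stated in full; the proofs are below) =====
def Claim_equal_get_month_name : Prop := ∀ (day_number : Int), Dom_get_month_name day_number → Spec_get_month_name day_number (get_month_name day_number)

-- ===== LEMMAS AND PROOFS =====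
-- one unfolding step of the binary search per concrete fuel value (the search from
-- (lo, hi) = (0, 12) terminates within 4 iterations, so steps 12..8 suffice)
lemma pvBisect_step12 (d : Int) (lo hi : Nat) : pvBisect d 12 lo hi =
    (if lo < hi then
      let mid := (lo + hi) / 2
      if pvCumulative.getD mid 0 < d then pvBisect d 11 (mid + 1) hi
      else pvBisect d 11 lo mid
    else lo) := rfl

lemma pvBisect_step11 (d : Int) (lo hi : Nat) : pvBisect d 11 lo hi =
    (if lo < hi then
      let mid := (lo + hi) / 2
      if pvCumulative.getD mid 0 < d then pvBisect d 10 (mid + 1) hi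
      else pvBisect d 10 lo mid
    else lo) := rfl

lemma pvBisect_step10 (d : Int) (lo hi : Nat) : pvBisect d 10 lo hi =
    (if lo < hi then
      let mid := (lo + hi) / 2
      if pvCumulative.getD mid 0 < d then pvBisect d 9 (mid + 1) hi
      else pvBisect d 9 lo mid
    else lo) := rfl

lemma pvBisect_step9 (d : Int) (lo hi : Nat) : pvBisect d 9 lo hi =
    (if lo < hi then
      let mid := (lo + hi) / 2
      if pvCumulative.getD mid 0 < d then pvBisect d 8 (mid + 1) hi
      else pvBisect d 8 lo mid
    else lo) := rfl

lemma pvBisect_step8 (d : Int) (lo hi : Nat) : pvBisect d 8 lo hi =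
    (if lo < hi then
      let mid := (lo + hi) / 2
      if pvCumulative.getD mid 0 < d then pvBisect d 7 (mid + 1) hi
      else pvBisect d 7 lo mid
    else lo) := rfl

-- ===== VERDICT (by name: the statement is the Claim_ definition above) =====
set_option maxHeartbeats 2000000 in
theorem get_month_name_spec : Claim_equal_get_month_name := by
  intro d _
  unfold Spec_get_month_name get_month_name get_month_name_alt
  simp [pvLoopA, pvMonths, pvCumulative, List.getD, pvBisect_step12, pvBisect_step11,
    pvBisect_step10, pvBisect_step9, pvBisect_step8]
  split_ifs <;> first | rfl | omega
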